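-- pv_equiv track=rewrite | github.com/CatherineLi1/Class-Assignments | fibs.py | check_periods
-- ===== SOURCE A (Python) =====
-- def check_periods(string):
--     '''
--     Parameter: string
--     Return: False if string has more than 1 period, True otherwise
--     '''
--     no_double_period = True
--     period = "."
--     counter = 0 #counter reflects the number of periods in the string
--
--     #check if more than 1 period in the string
--     for index in range(len(string)):
--         if period in string[index]:
--             counter += 1
--
--     #False if more than one period
--     if counter >= 2:
--         no_double_period = False
--
--     return no_double_period
-- ===== SOURCE B (Python) =====
-- def check_periods(string):
--     '''
--     Parameter: string
--     Return: False if string has more than 1 period, True otherwise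
--     '''
--     # n periods split the string into n+1 segments; at most one period <=> at most 2 parts
--     return len(string.split('.')) <= 2
-- ===== Notes on version B (the rewrite author's own statement) =====
-- stated objective: simpler
-- what changed: Replaces the indexed per-character scan with a running counter by a single split on the period and a comparison of the segment count (periods+1) against 2.
import Mathlib
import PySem

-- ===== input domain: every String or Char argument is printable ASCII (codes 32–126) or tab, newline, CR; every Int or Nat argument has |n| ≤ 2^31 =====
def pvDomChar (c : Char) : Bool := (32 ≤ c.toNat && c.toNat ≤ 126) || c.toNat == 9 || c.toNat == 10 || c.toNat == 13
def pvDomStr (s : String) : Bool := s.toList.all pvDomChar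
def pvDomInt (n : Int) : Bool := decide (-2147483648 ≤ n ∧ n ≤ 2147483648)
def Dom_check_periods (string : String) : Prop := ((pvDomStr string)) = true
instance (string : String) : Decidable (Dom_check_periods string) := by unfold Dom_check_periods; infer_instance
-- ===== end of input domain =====

-- B replaces the per-character counting loop by one split on '.' and a segment-count test (objective: simpler).

-- ===== PORT A =====
-- for index in range(len(string)): if "." in string[index]: counter += 1; return counter < 2.
-- string[index] never raises here (index in range), so pyGetD's default is unreachable.
def check_periods (string : String) : Bool :=
  let s := string.toList
  let counter : Int :=
    (PySem.List.pyRange 0 (PySem.List.len s) 1).foldl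
      (fun counter index =>
        if PySem.Chars.isIn ['.'] [PySem.List.pyGetD s index ' '] then counter + 1 else counter) 0
  if counter ≥ 2 then false else true

-- ===== PORT B =====
-- return len(string.split('.')) <= 2
def check_periods_alt (string : String) : Bool :=
  decide (((PySem.Chars.splitOn string.toList ['.']).length : Int) ≤ 2)

-- ===== PRECONDITION & SPEC =====
def Spec_check_periods (string : String) (out : Bool) : Prop := out = check_periods_alt string
instance (string : String) (out : Bool) : Decidable (Spec_check_periods string out) := by unfold Spec_check_periods; infer_instance

-- ===== CLAIM (what is proved, stated in full; the proofs are below) =====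
def Claim_equal_check_periods : Prop := ∀ (string : String), Dom_check_periods string → Spec_check_periods string (check_periods string)

-- ===== LEMMAS AND PROOFS =====

-- splitting on a single char yields (count of that char) + 1 segments
theorem splitOn_go_length (sep : Char) (fuel : Nat) :
    ∀ (l cur : List Char) (acc : List (List Char)), l.length < fuel →
      (PySem.Chars.splitOn.go [sep] fuel l cur acc).length = acc.length + l.count sep + 1 := by
  induction fuel with
  | zero => intro l cur acc h; omega
  | succ f ih =>
    intro l cur acc h
    cases l with
    | nil => simp [PySem.Chars.splitOn.go]
    | cons c rest =>
      simp only [PySem.Chars.splitOn.go]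
      by_cases hc : c = sep
      · have hpre : List.isPrefixOf [sep] (c :: rest) = true := by
          simp [List.isPrefixOf, hc]
        rw [if_pos hpre]
        simp only [List.length_cons] at h
        have := ih (List.drop 1 (c :: rest)) [] (cur.reverse :: acc) (by simp; omega)
        simp only [List.drop_succ_cons, List.drop_zero] at this
        simp only [List.length_singleton, List.drop_succ_cons, List.drop_zero]
        rw [this]
        simp [hc]
        omega
      · have hpre : List.isPrefixOf [sep] (c :: rest) = false := by
          simp [List.isPrefixOf]
          exact fun hh => hc (by simpa [eq_comm] using hh)
        rw [if_neg (by simp [hpre])]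
        simp only [List.length_cons] at h
        rw [ih rest (c :: cur) acc (by omega)]
        simp [hc]

theorem length_splitOn_single (s : List Char) (sep : Char) :
    (PySem.Chars.splitOn s [sep]).length = s.count sep + 1 := by
  unfold PySem.Chars.splitOn
  rw [splitOn_go_length sep (s.length + 1) s [] [] (by omega)]
  simp

theorem isIn_dot_singleton (c : Char) :
    PySem.Chars.isIn ['.'] [c] = (c == '.') := by
  by_cases h : c = '.'
  · subst h; decide
  · have : ¬ (['.'] <:+: [c]) := by
      intro ⟨p, q, hh⟩
      rcases List.infix_iff_prefix_suffix.mp ⟨p, q, hh⟩ with ⟨t, ht, hts⟩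
      -- direct: a sublist of [c] containing '.' forces c = '.'
      have : '.' ∈ [c] := hts.subset (ht.subset (by simp))
      simp at this; exact h this.symm
    rw [(PySem.Chars.isIn_eq_false_iff _ _).mpr this]
    simp [h]


-- ===== VERDICT (by name: the statement is the Claim_ definition above) =====
theorem check_periods_spec : Claim_equal_check_periods := by
  intro string _
  unfold Spec_check_periods check_periods check_periods_alt
  have key : (PySem.List.pyRange 0 (PySem.List.len string.toList) 1).foldl
      (fun counter index =>
        if PySem.Chars.isIn ['.'] [PySem.List.pyGetD string.toList index ' '] then counter + 1
        else counter) (0 : Int)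
      = (string.toList.count '.' : Int) := by
    rw [PySem.List.foldl_pyRange_pyGetD string.toList ' '
        (fun counter c => if PySem.Chars.isIn ['.'] [c] then counter + 1 else counter) 0 le_rfl]
    simp only [Int.toNat_zero, List.drop_zero,
      PySem.List.foldl_count_if (fun c => PySem.Chars.isIn ['.'] [c]) string.toList 0]
    rw [List.count_eq_countP, zero_add,
      List.countP_congr (q := fun x => x == '.') (fun c _ => by simp [isIn_dot_singleton])]
  simp only [key, length_splitOn_single]
  by_cases h : (string.toList.count '.' : Int) ≥ 2
  · rw [if_pos h]
    symm
    simp only [decide_eq_false_iff_not]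
    push_cast
    omega
  · rw [if_neg h]
    symm
    simp only [decide_eq_true_iff]
    push_cast at h ⊢
    omega
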